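-- pv_equiv track=rewrite | github.com/97Kzone/CodeTest_practice | Unknown/15686.py | check
-- ===== SOURCE A (Python) =====
-- def check(store, home):
--     res = 0
--     for i, j in home:
--         m = 10000
--         for x, y in store:
--             m = min(m, abs(i-x) + abs(j-y))
--         res += m
--
--     return res
-- ===== SOURCE B (Python) =====
-- def nearest(store, a, b):
--     if not store:
--         return 10000
--     x, y = store[0]
--     d = abs(a - x) + abs(b - y)
--     r = nearest(store[1:], a, b)
--     return d if d < r else r
--
-- def check(store, home):
--     if not home:
--         return 0
--     a, b = home[0]
--     return nearest(store, a, b) + check(store, home[1:])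
-- ===== Notes on version B (the rewrite author's own statement) =====
-- stated objective: alternative
-- what changed: Recursive decomposition instead of nested accumulator loops: a right-recursive nearest helper computes each home's minimum by an if-comparison from the tail, and check recurses on the home list summing those minima.
import Mathlib
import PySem

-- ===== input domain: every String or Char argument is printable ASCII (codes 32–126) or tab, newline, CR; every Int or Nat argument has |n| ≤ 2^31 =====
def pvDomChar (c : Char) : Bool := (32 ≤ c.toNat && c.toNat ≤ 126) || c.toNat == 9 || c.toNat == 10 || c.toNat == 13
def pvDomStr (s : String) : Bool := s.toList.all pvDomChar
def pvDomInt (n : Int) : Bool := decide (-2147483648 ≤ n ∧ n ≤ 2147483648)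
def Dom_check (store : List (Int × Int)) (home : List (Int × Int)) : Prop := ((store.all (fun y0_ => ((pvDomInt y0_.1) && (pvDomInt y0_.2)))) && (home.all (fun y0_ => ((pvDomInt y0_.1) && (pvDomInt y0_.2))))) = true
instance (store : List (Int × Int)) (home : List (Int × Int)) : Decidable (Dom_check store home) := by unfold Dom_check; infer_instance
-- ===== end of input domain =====

-- B replaces A's nested accumulator loops by a recursive decomposition: a right-recursive
-- nearest helper (if-comparison against the tail's result) plus recursion on the home list
-- (objective: alternative, same cost).

-- ===== PORT A =====
def check (store : List (Int × Int)) (home : List (Int × Int)) : Int :=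
  home.foldl (fun res ij =>
    res + store.foldl (fun m xy => min m (|ij.1 - xy.1| + |ij.2 - xy.2|)) 10000) 0

-- ===== PORT B =====
def nearestAlt (store : List (Int × Int)) (a b : Int) : Int :=
  match store with
  | [] => 10000
  | (x, y) :: rest =>
    let d := |a - x| + |b - y|
    let r := nearestAlt rest a b
    if d < r then d else r

def check_alt (store : List (Int × Int)) (home : List (Int × Int)) : Int :=
  match home with
  | [] => 0
  | (a, b) :: rest => nearestAlt store a b + check_alt store rest

-- ===== PRECONDITION & SPEC =====
def Spec_check (store : List (Int × Int)) (home : List (Int × Int)) (out : Int) : Prop := out = check_alt store home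
instance (store : List (Int × Int)) (home : List (Int × Int)) (out : Int) : Decidable (Spec_check store home out) := by unfold Spec_check; infer_instance

-- ===== CLAIM (what is proved, stated in full; the proofs are below) =====
def Claim_equal_check : Prop := ∀ (store : List (Int × Int)) (home : List (Int × Int)), Dom_check store home → Spec_check store home (check store home)

-- ===== LEMMAS AND PROOFS =====

-- B's recursive minimum never exceeds its 10000 seed
theorem pv_nearest_le : ∀ (store : List (Int × Int)) (a b : Int), nearestAlt store a b ≤ 10000 := by
  intro store a b
  induction store with
  | nil => simp [nearestAlt]
  | cons s rest ih =>
    obtain ⟨x, y⟩ := s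
    simp only [nearestAlt]
    split_ifs with hd <;> omega

-- A's inner left fold with accumulator acc ≤ 10000 equals min acc (B's right-recursive minimum)
theorem pv_inner_eq (a b : Int) :
    ∀ (store : List (Int × Int)) (acc : Int), acc ≤ 10000 →
      store.foldl (fun m xy => min m (|a - xy.1| + |b - xy.2|)) acc
        = min acc (nearestAlt store a b) := by
  intro store
  induction store with
  | nil => intro acc h; simp [nearestAlt]; omega
  | cons s rest ih =>
    intro acc h
    obtain ⟨x, y⟩ := s
    simp only [List.foldl_cons, nearestAlt]
    rw [ih _ (le_trans (min_le_left _ _) h)]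
    rw [show (if |a - x| + |b - y| < nearestAlt rest a b then |a - x| + |b - y|
              else nearestAlt rest a b) = min (|a - x| + |b - y|) (nearestAlt rest a b) by
          rw [min_def]; split_ifs with h1 h2 <;> omega]
    rw [min_assoc]

-- A's outer fold with accumulator c equals c + B's recursive sum
theorem pv_outer_eq (store : List (Int × Int)) :
    ∀ (home : List (Int × Int)) (c : Int),
      home.foldl (fun res ij =>
        res + store.foldl (fun m xy => min m (|ij.1 - xy.1| + |ij.2 - xy.2|)) 10000) c
        = c + check_alt store home := by
  intro home
  induction home with
  | nil => intro c; simp [check_alt]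
  | cons h rest ih =>
    intro c
    obtain ⟨a, b⟩ := h
    simp only [List.foldl_cons, check_alt, ih]
    rw [pv_inner_eq a b store 10000 le_rfl, min_eq_right (pv_nearest_le store a b), add_assoc]

-- ===== VERDICT (by name: the statement is the Claim_ definition above) =====
theorem check_spec : Claim_equal_check := by
  intro store home _
  unfold Spec_check check
  rw [pv_outer_eq store home 0, zero_add]
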